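-- pv_equiv track=rewrite | github.com/vpngMain/server-backup | smenovac/app.py | _compute_coverage_gaps
-- ===== SOURCE A (Python) =====
-- def _minutes_to_time(m):
--     """510 -> '08:30'"""
--     h, mn = divmod(m, 60)
--     return f"{h:02d}:{mn:02d}"
--
-- def _compute_coverage_gaps(open_min, close_min, shifts):
--     """Vrátí mezery v pokrytí. shifts = [(start_min, end_min), ...]."""
--     if open_min >= close_min:
--         return []  # neplatná otevírací doba
--     intervals = []
--     for s in shifts:
--         start_min = max(s[0], open_min)
--         end_min = min(s[1], close_min)
--         if start_min < end_min:
--             intervals.append((start_min, end_min))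
--     if not intervals:
--         return [(_minutes_to_time(open_min), _minutes_to_time(close_min))]
--     intervals.sort(key=lambda x: x[0])
--     merged = [intervals[0]]
--     for a, b in intervals[1:]:
--         if a <= merged[-1][1]:
--             merged[-1] = (merged[-1][0], max(merged[-1][1], b))
--         else:
--             merged.append((a, b))
--     gaps = []
--     if merged[0][0] > open_min:
--         gaps.append((_minutes_to_time(open_min), _minutes_to_time(merged[0][0])))
--     for i in range(len(merged) - 1):
--         gaps.append((_minutes_to_time(merged[i][1]), _minutes_to_time(merged[i + 1][0])))
--     if merged[-1][1] < close_min: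
--         gaps.append((_minutes_to_time(merged[-1][1]), _minutes_to_time(close_min)))
--     return gaps
-- ===== SOURCE B (Python) =====
-- def _minutes_to_time(m):
--     """510 -> '08:30'"""
--     h, mn = divmod(m, 60)
--     return f"{h:02d}:{mn:02d}"
--
-- def _compute_coverage_gaps(open_min, close_min, shifts):
--     """Cursor sweep: walk the clipped shifts in start order, emitting each
--     uncovered stretch directly -- no merged-interval list, no empty-case branch."""
--     if open_min >= close_min:
--         return []
--     clipped = [(max(s, open_min), min(e, close_min)) for s, e in shifts]
--     clipped = [(a, b) for a, b in clipped if a < b]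
--     gaps = []
--     cursor = open_min
--     for a, b in sorted(clipped, key=lambda t: t[0]):
--         if cursor < a:
--             gaps.append((_minutes_to_time(cursor), _minutes_to_time(a)))
--         if b > cursor:
--             cursor = b
--     if cursor < close_min:
--         gaps.append((_minutes_to_time(cursor), _minutes_to_time(close_min)))
--     return gaps
-- ===== Notes on version B (the rewrite author's own statement) =====
-- stated objective: simpler
-- what changed: Replaces A's explicit merge of overlapping intervals plus three separate gap-emission phases (prefix gap, adjacent gaps, suffix gap, with a special branch for no intervals) by a single cursor sweep over the start-sorted clipped shifts that emits each uncovered stretch directly.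
import Mathlib
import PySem

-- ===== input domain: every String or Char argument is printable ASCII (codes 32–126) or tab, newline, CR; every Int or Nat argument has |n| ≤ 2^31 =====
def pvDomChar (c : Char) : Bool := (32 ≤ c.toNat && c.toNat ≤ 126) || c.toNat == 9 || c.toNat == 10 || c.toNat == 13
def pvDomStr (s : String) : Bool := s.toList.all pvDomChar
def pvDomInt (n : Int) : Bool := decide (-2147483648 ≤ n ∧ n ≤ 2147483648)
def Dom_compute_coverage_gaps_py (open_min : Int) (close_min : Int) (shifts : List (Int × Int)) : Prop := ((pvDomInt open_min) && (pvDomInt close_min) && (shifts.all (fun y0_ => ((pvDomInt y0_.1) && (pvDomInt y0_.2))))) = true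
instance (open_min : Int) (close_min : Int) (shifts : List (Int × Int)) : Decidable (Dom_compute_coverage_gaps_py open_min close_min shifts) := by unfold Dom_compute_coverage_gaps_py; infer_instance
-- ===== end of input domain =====

-- B replaces A's merge-overlapping-intervals + three gap-emission phases by a single
-- cursor sweep over the start-sorted clipped shifts (alternative decomposition, same cost).


-- ===== PORT A =====
-- f"{n:02d}" for width 2: pads a single nonnegative digit with '0'; exact for all Int
def pvFmt2 (n : Int) : String :=
  if 0 ≤ n ∧ n < 10 then "0" ++ PySem.Int.toStr n else PySem.Int.toStr n

-- _minutes_to_time: divmod(m, 60) then f"{h:02d}:{mn:02d}"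
def minutes_to_time (m : Int) : String :=
  pvFmt2 (PySem.Int.floordiv m 60) ++ ":" ++ pvFmt2 (PySem.Int.mod m 60)

-- A's merge loop; Python's `merged` list is represented as done ++ [cur]
-- (mutating merged[-1] = updating cur; appending = moving cur into done)
def pvMergeLoop (done : List (Int × Int)) (cur : Int × Int) : List (Int × Int) → List (Int × Int)
  | [] => done ++ [cur]
  | (a, b) :: xs =>
      if a ≤ cur.2 then pvMergeLoop done (cur.1, max cur.2 b) xs
      else pvMergeLoop (done ++ [cur]) (a, b) xs

-- A's `for i in range(len(merged)-1)` loop: gaps between adjacent merged intervals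
def pvAdjGaps : List (Int × Int) → List (String × String)
  | x :: y :: xs => (minutes_to_time x.2, minutes_to_time y.1) :: pvAdjGaps (y :: xs)
  | _ => []

def compute_coverage_gaps_py (open_min : Int) (close_min : Int) (shifts : List (Int × Int)) : List (String × String) :=
  if open_min ≥ close_min then []
  else
    let intervals := shifts.foldl (fun acc s =>
      if max s.1 open_min < min s.2 close_min then acc ++ [(max s.1 open_min, min s.2 close_min)] else acc) []
    match PySem.List.sorted intervals (fun x => x.1) false with
    | [] => [(minutes_to_time open_min, minutes_to_time close_min)]
    | first :: rest =>
      let merged := pvMergeLoop [] first rest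
      (if (merged.headD (0, 0)).1 > open_min then
        [(minutes_to_time open_min, minutes_to_time (merged.headD (0, 0)).1)] else [])
      ++ pvAdjGaps merged
      ++ (if (merged.getLastD (0, 0)).2 < close_min then
        [(minutes_to_time (merged.getLastD (0, 0)).2, minutes_to_time close_min)] else [])

-- ===== PORT B =====
-- B's cursor sweep: emit a gap whenever the next start is beyond the cursor
def pvSweep (close_min : Int) (cursor : Int) : List (Int × Int) → List (String × String)
  | [] => if cursor < close_min then [(minutes_to_time cursor, minutes_to_time close_min)] else []
  | (a, b) :: xs =>
      (if cursor < a then [(minutes_to_time cursor, minutes_to_time a)] else [])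
      ++ pvSweep close_min (if b > cursor then b else cursor) xs

def compute_coverage_gaps_py_alt (open_min : Int) (close_min : Int) (shifts : List (Int × Int)) : List (String × String) :=
  if open_min ≥ close_min then []
  else
    let clipped := (shifts.map (fun s => (max s.1 open_min, min s.2 close_min))).filter
      (fun p => p.1 < p.2)
    pvSweep close_min open_min (PySem.List.sorted clipped (fun t => t.1) false)

-- ===== PRECONDITION & SPEC =====
def Spec_compute_coverage_gaps_py (open_min : Int) (close_min : Int) (shifts : List (Int × Int)) (out : List (String × String)) : Prop := out = compute_coverage_gaps_py_alt open_min close_min shifts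
instance (open_min : Int) (close_min : Int) (shifts : List (Int × Int)) (out : List (String × String)) : Decidable (Spec_compute_coverage_gaps_py open_min close_min shifts out) := by unfold Spec_compute_coverage_gaps_py; infer_instance

-- ===== CLAIM (what is proved, stated in full; the proofs are below) =====
def Claim_equal_compute_coverage_gaps_py : Prop := ∀ (open_min : Int) (close_min : Int) (shifts : List (Int × Int)), Dom_compute_coverage_gaps_py open_min close_min shifts → Spec_compute_coverage_gaps_py open_min close_min shifts (compute_coverage_gaps_py open_min close_min shifts)

-- ===== LEMMAS AND PROOFS =====

-- Non-tail-recursive form of A's merge loop (proof helper)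
def pvMergeAux (cur : Int × Int) : List (Int × Int) → List (Int × Int)
  | [] => [cur]
  | (a, b) :: xs =>
      if a ≤ cur.2 then pvMergeAux (cur.1, max cur.2 b) xs
      else cur :: pvMergeAux (a, b) xs

lemma pvMergeLoop_eq (xs : List (Int × Int)) : ∀ (done : List (Int × Int)) (cur : Int × Int),
    pvMergeLoop done cur xs = done ++ pvMergeAux cur xs := by
  induction xs with
  | nil => intro done cur; simp [pvMergeLoop, pvMergeAux]
  | cons p xs ih =>
      intro done cur
      obtain ⟨a, b⟩ := p
      simp only [pvMergeLoop, pvMergeAux]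
      split_ifs with h
      · exact ih done _
      · rw [ih (done ++ [cur]) (a, b)]; simp

lemma pvMergeAux_ne_nil (xs : List (Int × Int)) : ∀ cur, pvMergeAux cur xs ≠ [] := by
  induction xs with
  | nil => intro cur; simp [pvMergeAux]
  | cons p xs ih =>
      intro cur
      obtain ⟨a, b⟩ := p
      simp only [pvMergeAux]
      split_ifs with h
      · exact ih _
      · simp

lemma pvMergeAux_head_fst (xs : List (Int × Int)) : ∀ c1 c2,
    ((pvMergeAux (c1, c2) xs).headD (0, 0)).1 = c1 := by
  induction xs with
  | nil => intro c1 c2; simp [pvMergeAux]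
  | cons p xs ih =>
      intro c1 c2
      obtain ⟨a, b⟩ := p
      simp only [pvMergeAux]
      split_ifs with h
      · exact ih c1 _
      · simp

-- the gap list A extracts from a merged list, minus the prefix gap
def pvGapsTail (close_min : Int) (m : List (Int × Int)) : List (String × String) :=
  pvAdjGaps m ++ (if (m.getLastD (0, 0)).2 < close_min then
    [(minutes_to_time (m.getLastD (0, 0)).2, minutes_to_time close_min)] else [])

-- Core: B's sweep from cursor c2 computes A's tail gaps of the merged list
lemma pvSweep_eq_gapsTail (close_min : Int) (xs : List (Int × Int)) : ∀ c1 c2,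
    (∀ p ∈ xs, p.1 < p.2 ∧ p.2 ≤ close_min) →
    pvSweep close_min c2 xs = pvGapsTail close_min (pvMergeAux (c1, c2) xs) := by
  induction xs with
  | nil => intro c1 c2 _; simp [pvSweep, pvMergeAux, pvGapsTail, pvAdjGaps]
  | cons p xs ih =>
      intro c1 c2 hall
      obtain ⟨a, b⟩ := p
      have hab : a < b := (hall (a, b) (by simp)).1
      have hrest : ∀ p ∈ xs, p.1 < p.2 ∧ p.2 ≤ close_min :=
        fun p hp => hall p (List.mem_cons_of_mem _ hp)
      simp only [pvSweep, pvMergeAux]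
      by_cases h : a ≤ c2
      · -- a ≤ c2 : merged branch, no gap emitted
        rw [if_pos h, if_neg (show ¬ c2 < a by omega),
          (show (if b > c2 then b else c2) = max c2 b by split_ifs <;> omega),
          List.nil_append]
        exact ih c1 (max c2 b) hrest
      · -- a > c2 : a gap (c2, a), merge starts a fresh interval
        rw [if_neg h, if_pos (show c2 < a by omega),
          (show (if b > c2 then b else c2) = b by split_ifs <;> omega), ih a b hrest]
        -- unfold pvGapsTail on the cons
        have hne := pvMergeAux_ne_nil xs (a, b)
        obtain ⟨q, m', hm⟩ : ∃ q m', pvMergeAux (a, b) xs = q :: m' := by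
          cases hmm : pvMergeAux (a, b) xs with
          | nil => exact absurd hmm hne
          | cons q m' => exact ⟨q, m', rfl⟩
        have hq1 : q.1 = a := by
          have := pvMergeAux_head_fst xs a b
          rw [hm] at this; simpa using this
        simp only [pvGapsTail, hm, pvAdjGaps, List.getLastD_cons]
        simp [hq1]

-- A's clip loop builds exactly B's filtered map
lemma pvClip_eq (o c : Int) (l : List (Int × Int)) : ∀ acc,
    l.foldl (fun acc s =>
      if max s.1 o < min s.2 c then acc ++ [(max s.1 o, min s.2 c)] else acc) acc
    = acc ++ (l.map (fun s => (max s.1 o, min s.2 c))).filter (fun p => p.1 < p.2) := by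
  induction l with
  | nil => intro acc; simp
  | cons s l ih =>
      intro acc
      simp only [List.foldl_cons, List.map_cons, List.filter_cons]
      by_cases h : max s.1 o < min s.2 c
      · rw [if_pos h, ih]; simp [h]
      · rw [if_neg h, ih]; simp [h]

-- every element of the clipped list is a proper subinterval of [open, close)
lemma pvClipped_mem (o c : Int) (l : List (Int × Int)) (p : Int × Int)
    (hp : p ∈ (l.map (fun s => (max s.1 o, min s.2 c))).filter (fun q => q.1 < q.2)) :
    o ≤ p.1 ∧ p.1 < p.2 ∧ p.2 ≤ c := by
  rw [List.mem_filter] at hp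
  obtain ⟨hmem, hlt⟩ := hp
  rw [List.mem_map] at hmem
  obtain ⟨s, _, rfl⟩ := hmem
  simp only [decide_eq_true_eq] at hlt
  refine ⟨le_max_right _ _, hlt, min_le_right _ _⟩

-- ===== VERDICT (by name: the statement is the Claim_ definition above) =====
theorem compute_coverage_gaps_py_spec : Claim_equal_compute_coverage_gaps_py := by
  intro open_min close_min shifts _
  unfold Spec_compute_coverage_gaps_py compute_coverage_gaps_py compute_coverage_gaps_py_alt
  by_cases hoc : open_min ≥ close_min
  · simp [hoc]
  · rw [if_neg hoc, if_neg hoc]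
    have hlt : open_min < close_min := by omega
    rw [pvClip_eq, List.nil_append]
    set clipped := (shifts.map (fun s => (max s.1 open_min, min s.2 close_min))).filter
      (fun p => p.1 < p.2) with hclip
    dsimp only
    cases hs : PySem.List.sorted clipped (fun x => x.1) false with
    | nil => simp [pvSweep, hlt]
    | cons first rest =>
        have hmemall : ∀ p ∈ first :: rest, open_min ≤ p.1 ∧ p.1 < p.2 ∧ p.2 ≤ close_min := by
          intro p hp
          have hpc : p ∈ clipped := (PySem.List.mem_sorted clipped (fun x => x.1) false p).mp (by rw [hs]; exact hp)
          exact pvClipped_mem _ _ _ _ hpc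
        obtain ⟨a0, b0⟩ := first
        obtain ⟨h0o, h0ab, h0c⟩ := hmemall (a0, b0) (by simp)
        have hrest : ∀ p ∈ rest, p.1 < p.2 ∧ p.2 ≤ close_min :=
          fun p hp => ⟨(hmemall p (List.mem_cons_of_mem _ hp)).2.1,
                       (hmemall p (List.mem_cons_of_mem _ hp)).2.2⟩
        simp only [pvMergeLoop_eq, List.nil_append, pvSweep]
        have hcur : (if b0 > open_min then b0 else open_min) = b0 := by split_ifs <;> omega
        rw [hcur, pvSweep_eq_gapsTail close_min rest a0 b0 hrest]
        have hhead := pvMergeAux_head_fst rest a0 b0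
        unfold pvGapsTail
        rw [hhead, List.append_assoc]
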